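-- pv_equiv track=rewrite | github.com/rodgemd1-lgtm/Startup-Intelligence-OS | pai/marketplace/packager.py | _generalize_prompt
-- ===== SOURCE A (Python) =====
-- def _generalize_prompt(prompt: str) -> str:
--     """Remove personal context from a prompt for distribution."""
--     replacements = {
--         "Mike": "{user_name}",
--         "Oracle Health": "{company_1}",
--         "Alex Recruiting": "{company_2}",
--         "Startup Intelligence OS": "{company_3}",
--         "Jacob": "{family_member}",
--         "James": "{family_member}",
--         "Matt Cohlmia": "{vip_contact}",
--     }
--     result = prompt
--     for old, new in replacements.items():
--         result = result.replace(old, new)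
--     return result
-- ===== SOURCE B (Python) =====
-- def _generalize_prompt(prompt: str) -> str:
--     """Remove personal context from a prompt for distribution."""
--     # tokens grouped by their first character: char -> [(rest_of_token, placeholder_name)]
--     dispatch = {
--         "M": [("ike", "user_name"), ("att Cohlmia", "vip_contact")],
--         "O": [("racle Health", "company_1")],
--         "A": [("lex Recruiting", "company_2")],
--         "S": [("tartup Intelligence OS", "company_3")],
--         "J": [("acob", "family_member"), ("ames", "family_member")],
--     }
--     out = []
--     i = 0
--     n = len(prompt)
--     while i < n:
--         c = prompt[i]
--         hit = None
--         for rest, name in dispatch.get(c, ()):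
--             if prompt.startswith(rest, i + 1):
--                 hit = (rest, name)
--                 break
--         if hit is None:
--             out.append(c)
--             i += 1
--         else:
--             out.append("{" + hit[1] + "}")
--             i += 1 + len(hit[0])
--     return "".join(out)
-- ===== Notes on version B (the rewrite author's own statement) =====
-- stated objective: alternative
-- what changed: A makes seven sequential full-string .replace passes over the whole prompt; B makes a single left-to-right scan that dispatches on the current character through a first-letter table of (token-remainder, placeholder-name) pairs, emitting the brace-wrapped placeholder name or copying the character as it goes.
import Mathlib
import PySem

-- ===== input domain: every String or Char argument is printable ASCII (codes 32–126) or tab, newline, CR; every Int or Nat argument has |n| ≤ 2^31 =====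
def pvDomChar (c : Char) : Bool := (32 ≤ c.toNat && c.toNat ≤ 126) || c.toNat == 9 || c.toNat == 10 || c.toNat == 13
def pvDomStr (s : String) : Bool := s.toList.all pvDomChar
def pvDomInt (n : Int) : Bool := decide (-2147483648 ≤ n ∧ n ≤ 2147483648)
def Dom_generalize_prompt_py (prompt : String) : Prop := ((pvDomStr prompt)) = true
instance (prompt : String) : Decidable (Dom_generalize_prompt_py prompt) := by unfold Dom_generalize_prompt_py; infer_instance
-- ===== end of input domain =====

-- B replaces A's seven sequential full-string .replace passes by one left-to-right scan that
-- dispatches on the current character through a first-letter table (objective: alternative).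

-- ===== PORT A =====
-- the dict, as an association list in insertion order
def pvReplacements : List (String × String) :=
  [("Mike", "{user_name}"),
   ("Oracle Health", "{company_1}"),
   ("Alex Recruiting", "{company_2}"),
   ("Startup Intelligence OS", "{company_3}"),
   ("Jacob", "{family_member}"),
   ("James", "{family_member}"),
   ("Matt Cohlmia", "{vip_contact}")]

def generalize_prompt_py (prompt : String) : String :=
  pvReplacements.foldl (fun result p => PySem.Str.replace result p.1 p.2) prompt

-- ===== PORT B =====
-- Source B's dispatch dict: first character -> [(rest_of_token, placeholder_name)], over code points
def pvDispatch : PySem.Dict Char (List (List Char × List Char)) :=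
  PySem.Dict.ofList
    [('M', [("ike".toList, "user_name".toList), ("att Cohlmia".toList, "vip_contact".toList)]),
     ('O', [("racle Health".toList, "company_1".toList)]),
     ('A', [("lex Recruiting".toList, "company_2".toList)]),
     ('S', [("tartup Intelligence OS".toList, "company_3".toList)]),
     ('J', [("acob".toList, "family_member".toList), ("ames".toList, "family_member".toList)])]

-- Source B's inner for/startswith loop over dispatch.get(c, ()): the hit, if any
def pvHit (cands : List (List Char × List Char)) (t : List Char) : Option (List Char × List Char) :=
  match cands with
  | [] => none
  | (rest, name) :: more => if rest.isPrefixOf t then some (rest, name) else pvHit more t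

-- Source B's while loop: copy the character, or emit "{" + name + "}" and skip the token remainder
def pvBScan : List Char → List Char
  | [] => []
  | c :: cs =>
    match pvHit (pvDispatch.getD c []) cs with
    | none => c :: pvBScan cs
    | some (rest, name) => ('{' :: (name ++ ['}'])) ++ pvBScan (cs.drop rest.length)
  termination_by t => t.length
  decreasing_by
  · simp
  · simp only [List.length_drop, List.length_cons]; omega

def generalize_prompt_py_alt (prompt : String) : String :=
  String.ofList (pvBScan prompt.toList)

-- ===== PRECONDITION & SPEC =====
def Spec_generalize_prompt_py (prompt : String) (out : String) : Prop := out = generalize_prompt_py_alt prompt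
instance (prompt : String) (out : String) : Decidable (Spec_generalize_prompt_py prompt out) := by unfold Spec_generalize_prompt_py; infer_instance

-- ===== CLAIM (what is proved, stated in full; the proofs are below) =====
def Claim_equal_generalize_prompt_py : Prop := ∀ (prompt : String), Dom_generalize_prompt_py prompt → Spec_generalize_prompt_py prompt (generalize_prompt_py prompt)

-- ===== LEMMAS AND PROOFS =====

-- proof-side model: the full (key, replacement) table in dict order, and the ordered
-- first-match scan it induces; A's replace chain and B's dispatch scan both equal it
def pvKeys : List (List Char × List Char) := pvReplacements.map (fun p => (p.1.toList, p.2.toList))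

def pvFirstMatch (R : List (List Char × List Char)) (t : List Char) : Option (List Char × List Char) :=
  match R with
  | [] => none
  | p :: rest => if p.1.isPrefixOf t then some p else pvFirstMatch rest t

def pvScan (R : List (List Char × List Char)) : List Char → List Char
  | [] => []
  | c :: cs =>
    match pvFirstMatch R (c :: cs) with
    | some p => p.2 ++ pvScan R (cs.drop (p.1.length - 1))
    | none => c :: pvScan R cs
  termination_by t => t.length
  decreasing_by
  · simp only [List.length_drop, List.length_cons]; omega
  · simp

-- structural characterization of PySem.Chars.replace (for a nonempty pattern)
def pvReplRec (old new : List Char) : List Char → List Char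
  | [] => []
  | c :: t =>
    if old.isPrefixOf (c :: t) then new ++ pvReplRec old new (t.drop (old.length - 1))
    else c :: pvReplRec old new t
  termination_by l => l.length
  decreasing_by
  · simp only [List.length_drop, List.length_cons]; omega
  · simp

lemma pvGo_eq (old new : List Char) (hold : old ≠ []) :
    ∀ (fuel : Nat) (l acc : List Char), l.length ≤ fuel →
      PySem.Chars.replace.go old new fuel l acc = acc.reverse ++ pvReplRec old new l := by
  intro fuel
  induction fuel with
  | zero =>
    intro l acc h
    have hl : l = [] := by cases l <;> simp_all
    subst hl
    simp [PySem.Chars.replace.go, pvReplRec]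
  | succ n ih =>
    intro l acc h
    cases l with
    | nil => simp [PySem.Chars.replace.go, pvReplRec]
    | cons c t =>
      obtain ⟨o, os, rfl⟩ : ∃ o os, old = o :: os := by
        cases old with
        | nil => exact absurd rfl hold
        | cons o os => exact ⟨o, os, rfl⟩
      by_cases hp : (o :: os).isPrefixOf (c :: t) = true
      · rw [show PySem.Chars.replace.go (o :: os) new (n+1) (c :: t) acc
              = PySem.Chars.replace.go (o :: os) new n (List.drop (o :: os).length (c :: t)) (new.reverse ++ acc) from by
            simp [PySem.Chars.replace.go, hp]]
        rw [ih _ _ (by simp at h ⊢; omega)]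
        rw [show pvReplRec (o :: os) new (c :: t)
              = new ++ pvReplRec (o :: os) new (t.drop ((o :: os).length - 1)) from by
            rw [pvReplRec]; simp [hp]]
        simp
      · rw [show PySem.Chars.replace.go (o :: os) new (n+1) (c :: t) acc
              = PySem.Chars.replace.go (o :: os) new n t (c :: acc) from by
            simp [PySem.Chars.replace.go, hp]]
        rw [ih _ _ (by simp at h ⊢; omega)]
        rw [show pvReplRec (o :: os) new (c :: t) = c :: pvReplRec (o :: os) new t from by
            rw [pvReplRec]; simp [hp]]
        simp

lemma pvReplace_eq (old new s : List Char) (hold : old ≠ []) :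
    PySem.Chars.replace s old new = pvReplRec old new s := by
  have : old.isEmpty = false := by cases old <;> simp_all
  rw [PySem.Chars.replace, this]
  simpa using pvGo_eq old new hold s.length s [] le_rfl

lemma pvScan_nil (t : List Char) : pvScan [] t = t := by
  induction t with
  | nil => simp [pvScan]
  | cons c cs ih => simp [pvScan, pvFirstMatch, ih]

lemma pvFirstMatch_append (R : List (List Char × List Char)) (p : List Char × List Char) (t : List Char) :
    pvFirstMatch (R ++ [p]) t =
      match pvFirstMatch R t with
      | some q => some q
      | none => if p.1.isPrefixOf t then some p else none := by
  induction R with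
  | nil => simp [pvFirstMatch]
  | cons p' rest ih =>
    by_cases h : p'.1.isPrefixOf t = true <;> simp [pvFirstMatch, h, ih]

lemma pvFirstMatch_eq_none_iff (R : List (List Char × List Char)) (t : List Char) :
    pvFirstMatch R t = none ↔ ∀ p ∈ R, ¬ (p.1.isPrefixOf t = true) := by
  induction R with
  | nil => simp [pvFirstMatch]
  | cons p' rest ih =>
    by_cases h : p'.1.isPrefixOf t = true
    · rw [show pvFirstMatch (p' :: rest) t = some p' from by rw [pvFirstMatch, if_pos h]]
      constructor
      · intro hc; cases hc
      · intro hall; exact absurd h (hall p' List.mem_cons_self)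
    · rw [show pvFirstMatch (p' :: rest) t = pvFirstMatch rest t from by rw [pvFirstMatch, if_neg h], ih]
      constructor
      · intro hall p hp
        rcases List.mem_cons.mp hp with rfl | hp'
        · exact h
        · exact hall p hp'
      · intro hall p hp; exact hall p (List.mem_cons_of_mem _ hp)

lemma pvFirstMatch_eq_some (R : List (List Char × List Char)) (t : List Char) (p : List Char × List Char)
    (h : pvFirstMatch R t = some p) : p ∈ R ∧ p.1.isPrefixOf t = true := by
  induction R with
  | nil => simp [pvFirstMatch] at h
  | cons p' rest ih =>
    by_cases hp : p'.1.isPrefixOf t = true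
    · simp [pvFirstMatch, hp] at h
      subst h
      exact ⟨List.mem_cons_self, hp⟩
    · simp [pvFirstMatch, hp] at h
      obtain ⟨h1, h2⟩ := ih h
      exact ⟨List.mem_cons_of_mem _ h1, h2⟩

-- a nonempty pattern whose head does not occur in pre cannot match inside or across pre
lemma pvReplRec_append_left (hd : Char) (k' rep pre X : List Char) (h : hd ∉ pre) :
    pvReplRec (hd :: k') rep (pre ++ X) = pre ++ pvReplRec (hd :: k') rep X := by
  induction pre with
  | nil => simp
  | cons a pre ih =>
    have hne : hd ≠ a := fun he => h (he ▸ List.mem_cons_self)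
    have hnp : ¬ ((hd :: k').isPrefixOf (a :: (pre ++ X)) = true) := by
      simp [List.isPrefixOf, hne]
    rw [List.cons_append, pvReplRec, if_neg hnp, ih (fun hm => h (List.mem_cons_of_mem _ hm)),
        List.cons_append]

-- every replacement starts with '{', so a '{'-free pattern matching the scan output matches the input
lemma pvPrefix_pvScan (R : List (List Char × List Char))
    (hreps : ∀ p ∈ R, p.2.head? = some '{') :
    ∀ (t k : List Char), k ≠ [] → '{' ∉ k → k.isPrefixOf (pvScan R t) = true → k.isPrefixOf t = true := by
  intro t
  induction t with
  | nil => intro k hk _ hpre; simp [pvScan] at hpre; simp_all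
  | cons c cs ih =>
    intro k hk hkb hpre
    obtain ⟨hd, k2, rfl⟩ : ∃ hd k2, k = hd :: k2 := by
      cases k with
      | nil => exact absurd rfl hk
      | cons hd k2 => exact ⟨hd, k2, rfl⟩
    cases hm : pvFirstMatch R (c :: cs) with
    | some p =>
      obtain ⟨hpR, -⟩ := pvFirstMatch_eq_some R _ p hm
      have hhd := hreps p hpR
      obtain ⟨a, r, ha⟩ : ∃ a r, p.2 = a :: r := by
        cases hp2 : p.2 with
        | nil => rw [hp2] at hhd; simp at hhd
        | cons a r => exact ⟨a, r, rfl⟩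
      have haeq : a = '{' := by rw [ha] at hhd; simpa using hhd
      rw [show pvScan R (c :: cs) = p.2 ++ pvScan R (cs.drop (p.1.length - 1)) from by
            rw [pvScan, hm]] at hpre
      rw [ha, haeq] at hpre
      simp [List.isPrefixOf] at hpre
      exact absurd hpre.1 (fun he => hkb (he ▸ List.mem_cons_self))
    | none =>
      rw [show pvScan R (c :: cs) = c :: pvScan R cs from by rw [pvScan, hm]] at hpre
      rw [List.isPrefixOf_iff_prefix] at hpre ⊢
      rw [List.cons_prefix_cons] at hpre ⊢
      obtain ⟨rfl, hpre2⟩ := hpre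
      refine ⟨rfl, ?_⟩
      by_cases h2 : k2 = []
      · subst h2; exact List.nil_prefix
      · exact List.isPrefixOf_iff_prefix.mp
          (ih k2 h2 (fun hm2 => hkb (List.mem_cons_of_mem _ hm2))
            (List.isPrefixOf_iff_prefix.mpr hpre2))

-- the scan copies positions where no key matches
lemma pvScan_copy (R : List (List Char × List Char)) :
    ∀ (n : Nat) (t : List Char), (∀ q, q < n → pvFirstMatch R (t.drop q) = none) →
      pvScan R t = t.take n ++ pvScan R (t.drop n) := by
  intro n
  induction n with
  | zero => intro t _; simp
  | succ n ih =>
    intro t h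
    cases t with
    | nil => simp [pvScan]
    | cons c cs =>
      have h0 : pvFirstMatch R (c :: cs) = none := by simpa using h 0 (Nat.succ_pos n)
      rw [show pvScan R (c :: cs) = c :: pvScan R cs from by rw [pvScan, h0]]
      rw [ih cs (fun q hq => by simpa using h (q + 1) (by omega))]
      simp

-- one .replace pass after scanning with R = scanning with R extended by the new pair
lemma pvStep (k rep : List Char) (R : List (List Char × List Char))
    (hk : k ≠ []) (hkb : '{' ∉ k)
    (hreps : ∀ p ∈ R, p.2.head? = some '{')
    (hhead : ∀ p ∈ R, p.2.contains (k.headD ' ') = false)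
    (hov : ∀ p ∈ R, ∀ q, q < k.length → 0 < q → ¬ p.1 <+: k.drop q ∧ ¬ k.drop q <+: p.1) :
    ∀ t, pvReplRec k rep (pvScan R t) = pvScan (R ++ [(k, rep)]) t := by
  suffices H : ∀ (n : Nat) (t : List Char), t.length ≤ n →
      pvReplRec k rep (pvScan R t) = pvScan (R ++ [(k, rep)]) t by
    exact fun t => H t.length t le_rfl
  intro n
  induction n with
  | zero =>
    intro t h
    have ht : t = [] := by cases t <;> simp_all
    subst ht
    simp [pvScan, pvReplRec]
  | succ n ih =>
    intro t ht
    cases t with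
    | nil => simp [pvScan, pvReplRec]
    | cons c cs =>
      obtain ⟨hd, k2, rfl⟩ : ∃ hd k2, k = hd :: k2 := by
        cases k with
        | nil => exact absurd rfl hk
        | cons hd k2 => exact ⟨hd, k2, rfl⟩
      cases hm : pvFirstMatch R (c :: cs) with
      | some p =>
        obtain ⟨hpR, hppre⟩ := pvFirstMatch_eq_some R _ p hm
        have hhd : hd ∉ p.2 := by simpa using hhead p hpR
        rw [show pvScan R (c :: cs) = p.2 ++ pvScan R (cs.drop (p.1.length - 1)) from by
              rw [pvScan, hm]]
        rw [pvReplRec_append_left hd k2 rep p.2 _ hhd]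
        rw [ih _ (by simp at ht ⊢; omega)]
        rw [show pvScan (R ++ [(hd :: k2, rep)]) (c :: cs)
              = p.2 ++ pvScan (R ++ [(hd :: k2, rep)]) (cs.drop (p.1.length - 1)) from by
            rw [pvScan, pvFirstMatch_append, hm]]
      | none =>
        by_cases hpk : (hd :: k2).isPrefixOf (c :: cs) = true
        · have hcopy : ∀ q, q < (hd :: k2).length → pvFirstMatch R ((c :: cs).drop q) = none := by
            intro q hq
            rcases Nat.eq_zero_or_pos q with h0 | hpos
            · subst h0; simpa using hm
            · rw [pvFirstMatch_eq_none_iff]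
              intro p hpR hpref
              obtain ⟨u, hu⟩ := List.isPrefixOf_iff_prefix.mp hpk
              have hdrop : (c :: cs).drop q = (hd :: k2).drop q ++ u := by
                rw [← hu, List.drop_append_of_le_length (le_of_lt hq)]
              have hpref' : p.1 <+: ((hd :: k2).drop q ++ u) := by
                rw [← hdrop]; exact List.isPrefixOf_iff_prefix.mp hpref
              obtain ⟨hno1, hno2⟩ := hov p hpR q hq hpos
              rcases Nat.lt_or_ge ((hd :: k2).drop q).length p.1.length with hlt | hge
              · exact hno2 (List.prefix_of_prefix_length_le (List.prefix_append _ _) hpref'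
                  (Nat.le_of_lt hlt))
              · exact hno1 (List.prefix_of_prefix_length_le hpref' (List.prefix_append _ _) hge)
          obtain ⟨u, hu⟩ := List.isPrefixOf_iff_prefix.mp hpk
          have h1 : pvScan R (c :: cs) = (hd :: k2) ++ pvScan R ((c :: cs).drop (hd :: k2).length) := by
            rw [pvScan_copy R (hd :: k2).length (c :: cs) hcopy]
            congr 1
            rw [← hu, List.take_left]
          rw [h1]
          have hcond : (hd :: k2).isPrefixOf
              (hd :: (k2 ++ pvScan R ((c :: cs).drop (hd :: k2).length))) = true := by
            exact List.isPrefixOf_iff_prefix.mpr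
              ⟨pvScan R ((c :: cs).drop (hd :: k2).length), by simp⟩
          rw [List.cons_append, pvReplRec, if_pos hcond]
          rw [show (hd :: k2).length - 1 = k2.length from by simp, List.drop_left]
          rw [ih (List.drop (hd :: k2).length (c :: cs)) (by simp at ht ⊢; omega)]
          have hsome : pvFirstMatch (R ++ [(hd :: k2, rep)]) (c :: cs) = some (hd :: k2, rep) := by
            rw [pvFirstMatch_append, hm]; simp [hpk]
          rw [show pvScan (R ++ [(hd :: k2, rep)]) (c :: cs)
                = rep ++ pvScan (R ++ [(hd :: k2, rep)]) (cs.drop ((hd :: k2).length - 1)) from by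
              rw [pvScan, hsome]]
          simp
        · have hscan : pvScan R (c :: cs) = c :: pvScan R cs := by rw [pvScan, hm]
          have hnp : ¬ ((hd :: k2).isPrefixOf (c :: pvScan R cs) = true) := by
            intro hcon
            rw [← hscan] at hcon
            exact hpk (pvPrefix_pvScan R hreps (c :: cs) (hd :: k2) hk hkb hcon)
          rw [hscan, pvReplRec, if_neg hnp, ih cs (by simp at ht; omega)]
          have hnone : pvFirstMatch (R ++ [(hd :: k2, rep)]) (c :: cs) = none := by
            rw [pvFirstMatch_append, hm]; simp [hpk]
          rw [show pvScan (R ++ [(hd :: k2, rep)]) (c :: cs)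
                = c :: pvScan (R ++ [(hd :: k2, rep)]) cs from by rw [pvScan, hnone]]

-- one step of B's dispatch scan computes exactly the ordered first-match step over the full keys
lemma pvPfxCons (a b : Char) (l t : List Char) :
    (a :: l).isPrefixOf (b :: t) = (a == b && l.isPrefixOf t) := rfl

lemma pvDispatch_mk : pvDispatch = PySem.Dict.mk
    [('M', [("ike".toList, "user_name".toList), ("att Cohlmia".toList, "vip_contact".toList)]),
     ('O', [("racle Health".toList, "company_1".toList)]),
     ('A', [("lex Recruiting".toList, "company_2".toList)]),
     ('S', [("tartup Intelligence OS".toList, "company_3".toList)]),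
     ('J', [("acob".toList, "family_member".toList), ("ames".toList, "family_member".toList)])] := rfl

set_option maxHeartbeats 1000000 in
set_option maxRecDepth 8192 in
lemma pvBStep (c : Char) (cs : List Char) :
    pvBScan (c :: cs) =
      match pvFirstMatch pvKeys (c :: cs) with
      | some p => p.2 ++ pvBScan (cs.drop (p.1.length - 1))
      | none => c :: pvBScan cs := by
  rw [pvBScan, pvDispatch_mk]
  by_cases hcM : c = 'M'
  · subst hcM
    by_cases h1 : "ike".toList.isPrefixOf cs = true
    · simp only [(by decide : (('M':Char) == 'M') = true),
      (by decide : (('O':Char) == 'M') = false),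
      (by decide : (('A':Char) == 'M') = false),
      (by decide : (('S':Char) == 'M') = false),
      (by decide : (('J':Char) == 'M') = false),
      PySem.Dict.getD_eq_get?_getD, PySem.Dict.get?, List.find?_cons, List.find?_nil,
      pvKeys, pvReplacements, List.map_cons, List.map_nil, pvFirstMatch, pvHit, pvPfxCons,
      show ("Mike".toList : List Char) = 'M' :: "ike".toList from rfl,
      show ("Oracle Health".toList : List Char) = 'O' :: "racle Health".toList from rfl,
      show ("Alex Recruiting".toList : List Char) = 'A' :: "lex Recruiting".toList from rfl,
      show ("Startup Intelligence OS".toList : List Char) = 'S' :: "tartup Intelligence OS".toList from rfl,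
      show ("Jacob".toList : List Char) = 'J' :: "acob".toList from rfl,
      show ("James".toList : List Char) = 'J' :: "ames".toList from rfl,
      show ("Matt Cohlmia".toList : List Char) = 'M' :: "att Cohlmia".toList from rfl,
      Bool.true_and, Bool.false_and, Option.map_some, Option.map_none, Option.getD_some,
      Option.getD_none, reduceIte, Bool.false_eq_true, h1] <;> try rfl
    · simp only [Bool.not_eq_true] at h1
      by_cases h2 : "att Cohlmia".toList.isPrefixOf cs = true
      · simp only [(by decide : (('M':Char) == 'M') = true),
      (by decide : (('O':Char) == 'M') = false),
      (by decide : (('A':Char) == 'M') = false),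
      (by decide : (('S':Char) == 'M') = false),
      (by decide : (('J':Char) == 'M') = false),
      PySem.Dict.getD_eq_get?_getD, PySem.Dict.get?, List.find?_cons, List.find?_nil,
      pvKeys, pvReplacements, List.map_cons, List.map_nil, pvFirstMatch, pvHit, pvPfxCons,
      show ("Mike".toList : List Char) = 'M' :: "ike".toList from rfl,
      show ("Oracle Health".toList : List Char) = 'O' :: "racle Health".toList from rfl,
      show ("Alex Recruiting".toList : List Char) = 'A' :: "lex Recruiting".toList from rfl,
      show ("Startup Intelligence OS".toList : List Char) = 'S' :: "tartup Intelligence OS".toList from rfl,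
      show ("Jacob".toList : List Char) = 'J' :: "acob".toList from rfl,
      show ("James".toList : List Char) = 'J' :: "ames".toList from rfl,
      show ("Matt Cohlmia".toList : List Char) = 'M' :: "att Cohlmia".toList from rfl,
      Bool.true_and, Bool.false_and, Option.map_some, Option.map_none, Option.getD_some,
      Option.getD_none, reduceIte, Bool.false_eq_true, h1, h2] <;> try rfl
      · simp only [Bool.not_eq_true] at h2
        simp only [(by decide : (('M':Char) == 'M') = true),
      (by decide : (('O':Char) == 'M') = false),
      (by decide : (('A':Char) == 'M') = false),
      (by decide : (('S':Char) == 'M') = false),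
      (by decide : (('J':Char) == 'M') = false),
      PySem.Dict.getD_eq_get?_getD, PySem.Dict.get?, List.find?_cons, List.find?_nil,
      pvKeys, pvReplacements, List.map_cons, List.map_nil, pvFirstMatch, pvHit, pvPfxCons,
      show ("Mike".toList : List Char) = 'M' :: "ike".toList from rfl,
      show ("Oracle Health".toList : List Char) = 'O' :: "racle Health".toList from rfl,
      show ("Alex Recruiting".toList : List Char) = 'A' :: "lex Recruiting".toList from rfl,
      show ("Startup Intelligence OS".toList : List Char) = 'S' :: "tartup Intelligence OS".toList from rfl,
      show ("Jacob".toList : List Char) = 'J' :: "acob".toList from rfl,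
      show ("James".toList : List Char) = 'J' :: "ames".toList from rfl,
      show ("Matt Cohlmia".toList : List Char) = 'M' :: "att Cohlmia".toList from rfl,
      Bool.true_and, Bool.false_and, Option.map_some, Option.map_none, Option.getD_some,
      Option.getD_none, reduceIte, Bool.false_eq_true, h1, h2] <;> try rfl
  by_cases hcO : c = 'O'
  · subst hcO
    by_cases h1 : "racle Health".toList.isPrefixOf cs = true
    · simp only [(by decide : (('M':Char) == 'O') = false),
      (by decide : (('O':Char) == 'O') = true),
      (by decide : (('A':Char) == 'O') = false),
      (by decide : (('S':Char) == 'O') = false),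
      (by decide : (('J':Char) == 'O') = false),
      PySem.Dict.getD_eq_get?_getD, PySem.Dict.get?, List.find?_cons, List.find?_nil,
      pvKeys, pvReplacements, List.map_cons, List.map_nil, pvFirstMatch, pvHit, pvPfxCons,
      show ("Mike".toList : List Char) = 'M' :: "ike".toList from rfl,
      show ("Oracle Health".toList : List Char) = 'O' :: "racle Health".toList from rfl,
      show ("Alex Recruiting".toList : List Char) = 'A' :: "lex Recruiting".toList from rfl,
      show ("Startup Intelligence OS".toList : List Char) = 'S' :: "tartup Intelligence OS".toList from rfl,
      show ("Jacob".toList : List Char) = 'J' :: "acob".toList from rfl,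
      show ("James".toList : List Char) = 'J' :: "ames".toList from rfl,
      show ("Matt Cohlmia".toList : List Char) = 'M' :: "att Cohlmia".toList from rfl,
      Bool.true_and, Bool.false_and, Option.map_some, Option.map_none, Option.getD_some,
      Option.getD_none, reduceIte, Bool.false_eq_true, h1] <;> try rfl
    · simp only [Bool.not_eq_true] at h1
      simp only [(by decide : (('M':Char) == 'O') = false),
      (by decide : (('O':Char) == 'O') = true),
      (by decide : (('A':Char) == 'O') = false),
      (by decide : (('S':Char) == 'O') = false),
      (by decide : (('J':Char) == 'O') = false),
      PySem.Dict.getD_eq_get?_getD, PySem.Dict.get?, List.find?_cons, List.find?_nil,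
      pvKeys, pvReplacements, List.map_cons, List.map_nil, pvFirstMatch, pvHit, pvPfxCons,
      show ("Mike".toList : List Char) = 'M' :: "ike".toList from rfl,
      show ("Oracle Health".toList : List Char) = 'O' :: "racle Health".toList from rfl,
      show ("Alex Recruiting".toList : List Char) = 'A' :: "lex Recruiting".toList from rfl,
      show ("Startup Intelligence OS".toList : List Char) = 'S' :: "tartup Intelligence OS".toList from rfl,
      show ("Jacob".toList : List Char) = 'J' :: "acob".toList from rfl,
      show ("James".toList : List Char) = 'J' :: "ames".toList from rfl,
      show ("Matt Cohlmia".toList : List Char) = 'M' :: "att Cohlmia".toList from rfl,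
      Bool.true_and, Bool.false_and, Option.map_some, Option.map_none, Option.getD_some,
      Option.getD_none, reduceIte, Bool.false_eq_true, h1] <;> try rfl
  by_cases hcA : c = 'A'
  · subst hcA
    by_cases h1 : "lex Recruiting".toList.isPrefixOf cs = true
    · simp only [(by decide : (('M':Char) == 'A') = false),
      (by decide : (('O':Char) == 'A') = false),
      (by decide : (('A':Char) == 'A') = true),
      (by decide : (('S':Char) == 'A') = false),
      (by decide : (('J':Char) == 'A') = false),
      PySem.Dict.getD_eq_get?_getD, PySem.Dict.get?, List.find?_cons, List.find?_nil,
      pvKeys, pvReplacements, List.map_cons, List.map_nil, pvFirstMatch, pvHit, pvPfxCons,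
      show ("Mike".toList : List Char) = 'M' :: "ike".toList from rfl,
      show ("Oracle Health".toList : List Char) = 'O' :: "racle Health".toList from rfl,
      show ("Alex Recruiting".toList : List Char) = 'A' :: "lex Recruiting".toList from rfl,
      show ("Startup Intelligence OS".toList : List Char) = 'S' :: "tartup Intelligence OS".toList from rfl,
      show ("Jacob".toList : List Char) = 'J' :: "acob".toList from rfl,
      show ("James".toList : List Char) = 'J' :: "ames".toList from rfl,
      show ("Matt Cohlmia".toList : List Char) = 'M' :: "att Cohlmia".toList from rfl,
      Bool.true_and, Bool.false_and, Option.map_some, Option.map_none, Option.getD_some,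
      Option.getD_none, reduceIte, Bool.false_eq_true, h1] <;> try rfl
    · simp only [Bool.not_eq_true] at h1
      simp only [(by decide : (('M':Char) == 'A') = false),
      (by decide : (('O':Char) == 'A') = false),
      (by decide : (('A':Char) == 'A') = true),
      (by decide : (('S':Char) == 'A') = false),
      (by decide : (('J':Char) == 'A') = false),
      PySem.Dict.getD_eq_get?_getD, PySem.Dict.get?, List.find?_cons, List.find?_nil,
      pvKeys, pvReplacements, List.map_cons, List.map_nil, pvFirstMatch, pvHit, pvPfxCons,
      show ("Mike".toList : List Char) = 'M' :: "ike".toList from rfl,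
      show ("Oracle Health".toList : List Char) = 'O' :: "racle Health".toList from rfl,
      show ("Alex Recruiting".toList : List Char) = 'A' :: "lex Recruiting".toList from rfl,
      show ("Startup Intelligence OS".toList : List Char) = 'S' :: "tartup Intelligence OS".toList from rfl,
      show ("Jacob".toList : List Char) = 'J' :: "acob".toList from rfl,
      show ("James".toList : List Char) = 'J' :: "ames".toList from rfl,
      show ("Matt Cohlmia".toList : List Char) = 'M' :: "att Cohlmia".toList from rfl,
      Bool.true_and, Bool.false_and, Option.map_some, Option.map_none, Option.getD_some,
      Option.getD_none, reduceIte, Bool.false_eq_true, h1] <;> try rfl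
  by_cases hcS : c = 'S'
  · subst hcS
    by_cases h1 : "tartup Intelligence OS".toList.isPrefixOf cs = true
    · simp only [(by decide : (('M':Char) == 'S') = false),
      (by decide : (('O':Char) == 'S') = false),
      (by decide : (('A':Char) == 'S') = false),
      (by decide : (('S':Char) == 'S') = true),
      (by decide : (('J':Char) == 'S') = false),
      PySem.Dict.getD_eq_get?_getD, PySem.Dict.get?, List.find?_cons, List.find?_nil,
      pvKeys, pvReplacements, List.map_cons, List.map_nil, pvFirstMatch, pvHit, pvPfxCons,
      show ("Mike".toList : List Char) = 'M' :: "ike".toList from rfl,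
      show ("Oracle Health".toList : List Char) = 'O' :: "racle Health".toList from rfl,
      show ("Alex Recruiting".toList : List Char) = 'A' :: "lex Recruiting".toList from rfl,
      show ("Startup Intelligence OS".toList : List Char) = 'S' :: "tartup Intelligence OS".toList from rfl,
      show ("Jacob".toList : List Char) = 'J' :: "acob".toList from rfl,
      show ("James".toList : List Char) = 'J' :: "ames".toList from rfl,
      show ("Matt Cohlmia".toList : List Char) = 'M' :: "att Cohlmia".toList from rfl,
      Bool.true_and, Bool.false_and, Option.map_some, Option.map_none, Option.getD_some,
      Option.getD_none, reduceIte, Bool.false_eq_true, h1] <;> try rfl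
    · simp only [Bool.not_eq_true] at h1
      simp only [(by decide : (('M':Char) == 'S') = false),
      (by decide : (('O':Char) == 'S') = false),
      (by decide : (('A':Char) == 'S') = false),
      (by decide : (('S':Char) == 'S') = true),
      (by decide : (('J':Char) == 'S') = false),
      PySem.Dict.getD_eq_get?_getD, PySem.Dict.get?, List.find?_cons, List.find?_nil,
      pvKeys, pvReplacements, List.map_cons, List.map_nil, pvFirstMatch, pvHit, pvPfxCons,
      show ("Mike".toList : List Char) = 'M' :: "ike".toList from rfl,
      show ("Oracle Health".toList : List Char) = 'O' :: "racle Health".toList from rfl,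
      show ("Alex Recruiting".toList : List Char) = 'A' :: "lex Recruiting".toList from rfl,
      show ("Startup Intelligence OS".toList : List Char) = 'S' :: "tartup Intelligence OS".toList from rfl,
      show ("Jacob".toList : List Char) = 'J' :: "acob".toList from rfl,
      show ("James".toList : List Char) = 'J' :: "ames".toList from rfl,
      show ("Matt Cohlmia".toList : List Char) = 'M' :: "att Cohlmia".toList from rfl,
      Bool.true_and, Bool.false_and, Option.map_some, Option.map_none, Option.getD_some,
      Option.getD_none, reduceIte, Bool.false_eq_true, h1] <;> try rfl
  by_cases hcJ : c = 'J'
  · subst hcJ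
    by_cases h1 : "acob".toList.isPrefixOf cs = true
    · simp only [(by decide : (('M':Char) == 'J') = false),
      (by decide : (('O':Char) == 'J') = false),
      (by decide : (('A':Char) == 'J') = false),
      (by decide : (('S':Char) == 'J') = false),
      (by decide : (('J':Char) == 'J') = true),
      PySem.Dict.getD_eq_get?_getD, PySem.Dict.get?, List.find?_cons, List.find?_nil,
      pvKeys, pvReplacements, List.map_cons, List.map_nil, pvFirstMatch, pvHit, pvPfxCons,
      show ("Mike".toList : List Char) = 'M' :: "ike".toList from rfl,
      show ("Oracle Health".toList : List Char) = 'O' :: "racle Health".toList from rfl,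
      show ("Alex Recruiting".toList : List Char) = 'A' :: "lex Recruiting".toList from rfl,
      show ("Startup Intelligence OS".toList : List Char) = 'S' :: "tartup Intelligence OS".toList from rfl,
      show ("Jacob".toList : List Char) = 'J' :: "acob".toList from rfl,
      show ("James".toList : List Char) = 'J' :: "ames".toList from rfl,
      show ("Matt Cohlmia".toList : List Char) = 'M' :: "att Cohlmia".toList from rfl,
      Bool.true_and, Bool.false_and, Option.map_some, Option.map_none, Option.getD_some,
      Option.getD_none, reduceIte, Bool.false_eq_true, h1] <;> try rfl
    · simp only [Bool.not_eq_true] at h1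
      by_cases h2 : "ames".toList.isPrefixOf cs = true
      · simp only [(by decide : (('M':Char) == 'J') = false),
      (by decide : (('O':Char) == 'J') = false),
      (by decide : (('A':Char) == 'J') = false),
      (by decide : (('S':Char) == 'J') = false),
      (by decide : (('J':Char) == 'J') = true),
      PySem.Dict.getD_eq_get?_getD, PySem.Dict.get?, List.find?_cons, List.find?_nil,
      pvKeys, pvReplacements, List.map_cons, List.map_nil, pvFirstMatch, pvHit, pvPfxCons,
      show ("Mike".toList : List Char) = 'M' :: "ike".toList from rfl,
      show ("Oracle Health".toList : List Char) = 'O' :: "racle Health".toList from rfl,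
      show ("Alex Recruiting".toList : List Char) = 'A' :: "lex Recruiting".toList from rfl,
      show ("Startup Intelligence OS".toList : List Char) = 'S' :: "tartup Intelligence OS".toList from rfl,
      show ("Jacob".toList : List Char) = 'J' :: "acob".toList from rfl,
      show ("James".toList : List Char) = 'J' :: "ames".toList from rfl,
      show ("Matt Cohlmia".toList : List Char) = 'M' :: "att Cohlmia".toList from rfl,
      Bool.true_and, Bool.false_and, Option.map_some, Option.map_none, Option.getD_some,
      Option.getD_none, reduceIte, Bool.false_eq_true, h1, h2] <;> try rfl
      · simp only [Bool.not_eq_true] at h2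
        simp only [(by decide : (('M':Char) == 'J') = false),
      (by decide : (('O':Char) == 'J') = false),
      (by decide : (('A':Char) == 'J') = false),
      (by decide : (('S':Char) == 'J') = false),
      (by decide : (('J':Char) == 'J') = true),
      PySem.Dict.getD_eq_get?_getD, PySem.Dict.get?, List.find?_cons, List.find?_nil,
      pvKeys, pvReplacements, List.map_cons, List.map_nil, pvFirstMatch, pvHit, pvPfxCons,
      show ("Mike".toList : List Char) = 'M' :: "ike".toList from rfl,
      show ("Oracle Health".toList : List Char) = 'O' :: "racle Health".toList from rfl,
      show ("Alex Recruiting".toList : List Char) = 'A' :: "lex Recruiting".toList from rfl,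
      show ("Startup Intelligence OS".toList : List Char) = 'S' :: "tartup Intelligence OS".toList from rfl,
      show ("Jacob".toList : List Char) = 'J' :: "acob".toList from rfl,
      show ("James".toList : List Char) = 'J' :: "ames".toList from rfl,
      show ("Matt Cohlmia".toList : List Char) = 'M' :: "att Cohlmia".toList from rfl,
      Bool.true_and, Bool.false_and, Option.map_some, Option.map_none, Option.getD_some,
      Option.getD_none, reduceIte, Bool.false_eq_true, h1, h2] <;> try rfl
  · have eM : (('M':Char) == c) = false := by
      simp only [beq_eq_false_iff_ne, ne_eq]; exact fun h => hcM h.symm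
    have eO : (('O':Char) == c) = false := by
      simp only [beq_eq_false_iff_ne, ne_eq]; exact fun h => hcO h.symm
    have eA : (('A':Char) == c) = false := by
      simp only [beq_eq_false_iff_ne, ne_eq]; exact fun h => hcA h.symm
    have eS : (('S':Char) == c) = false := by
      simp only [beq_eq_false_iff_ne, ne_eq]; exact fun h => hcS h.symm
    have eJ : (('J':Char) == c) = false := by
      simp only [beq_eq_false_iff_ne, ne_eq]; exact fun h => hcJ h.symm
    simp only [eM, eO, eA, eS, eJ,
      PySem.Dict.getD_eq_get?_getD, PySem.Dict.get?, List.find?_cons, List.find?_nil,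
      pvKeys, pvReplacements, List.map_cons, List.map_nil, pvFirstMatch, pvHit, pvPfxCons,
      show ("Mike".toList : List Char) = 'M' :: "ike".toList from rfl,
      show ("Oracle Health".toList : List Char) = 'O' :: "racle Health".toList from rfl,
      show ("Alex Recruiting".toList : List Char) = 'A' :: "lex Recruiting".toList from rfl,
      show ("Startup Intelligence OS".toList : List Char) = 'S' :: "tartup Intelligence OS".toList from rfl,
      show ("Jacob".toList : List Char) = 'J' :: "acob".toList from rfl,
      show ("James".toList : List Char) = 'J' :: "ames".toList from rfl,
      show ("Matt Cohlmia".toList : List Char) = 'M' :: "att Cohlmia".toList from rfl,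
      Bool.true_and, Bool.false_and, Option.map_some, Option.map_none, Option.getD_some,
      Option.getD_none, reduceIte, Bool.false_eq_true] <;> try rfl

lemma pvBScan_eq : ∀ t, pvBScan t = pvScan pvKeys t := by
  suffices H : ∀ (n : Nat) (t : List Char), t.length ≤ n → pvBScan t = pvScan pvKeys t by
    exact fun t => H t.length t le_rfl
  intro n
  induction n with
  | zero =>
    intro t h
    have : t = [] := by cases t <;> simp_all
    subst this
    simp [pvBScan, pvScan]
  | succ n ih =>
    intro t ht
    cases t with
    | nil => simp [pvBScan, pvScan]
    | cons c cs =>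
      rw [pvBStep, pvScan]
      cases hm : pvFirstMatch pvKeys (c :: cs) with
      | none => simp only []; rw [ih cs (by simp at ht; omega)]
      | some p =>
        simp only []
        rw [ih _ (by simp at ht ⊢; omega)]

-- ===== VERDICT (by name: the statement is the Claim_ definition above) =====
set_option maxHeartbeats 1000000 in
set_option maxRecDepth 8192 in
theorem generalize_prompt_py_spec : Claim_equal_generalize_prompt_py := by
  intro prompt _
  unfold Spec_generalize_prompt_py generalize_prompt_py generalize_prompt_py_alt
  rw [pvBScan_eq]
  unfold pvKeys pvReplacements
  simp only [List.foldl_cons, List.foldl_nil, List.map_cons, List.map_nil]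
  simp only [PySem.Str.replace, String.toList_ofList]
  congr 1
  rw [pvReplace_eq _ _ _ (by decide : "Mike".toList ≠ [])]
  rw [pvReplace_eq _ _ _ (by decide : "Oracle Health".toList ≠ [])]
  rw [pvReplace_eq _ _ _ (by decide : "Alex Recruiting".toList ≠ [])]
  rw [pvReplace_eq _ _ _ (by decide : "Startup Intelligence OS".toList ≠ [])]
  rw [pvReplace_eq _ _ _ (by decide : "Jacob".toList ≠ [])]
  rw [pvReplace_eq _ _ _ (by decide : "James".toList ≠ [])]
  rw [pvReplace_eq _ _ _ (by decide : "Matt Cohlmia".toList ≠ [])]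
  have e1 : ∀ t, pvReplRec "Mike".toList "{user_name}".toList t
      = pvScan [("Mike".toList, "{user_name}".toList)] t := by
    intro t
    have h := pvStep "Mike".toList "{user_name}".toList [] (by decide) (by decide)
      (by simp) (by simp) (by simp) t
    rwa [pvScan_nil, List.nil_append] at h
  have e2 : ∀ t, pvReplRec "Oracle Health".toList "{company_1}".toList
      (pvScan [("Mike".toList, "{user_name}".toList)] t)
      = pvScan [("Mike".toList, "{user_name}".toList), ("Oracle Health".toList, "{company_1}".toList)] t := by
    intro t
    simpa using pvStep "Oracle Health".toList "{company_1}".toList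
      [("Mike".toList, "{user_name}".toList)]
      (by decide) (by decide) (by decide) (by decide) (by decide) t
  have e3 : ∀ t, pvReplRec "Alex Recruiting".toList "{company_2}".toList
      (pvScan [("Mike".toList, "{user_name}".toList), ("Oracle Health".toList, "{company_1}".toList)] t)
      = pvScan [("Mike".toList, "{user_name}".toList), ("Oracle Health".toList, "{company_1}".toList), ("Alex Recruiting".toList, "{company_2}".toList)] t := by
    intro t
    simpa using pvStep "Alex Recruiting".toList "{company_2}".toList
      [("Mike".toList, "{user_name}".toList), ("Oracle Health".toList, "{company_1}".toList)]
      (by decide) (by decide) (by decide) (by decide) (by decide) t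
  have e4 : ∀ t, pvReplRec "Startup Intelligence OS".toList "{company_3}".toList
      (pvScan [("Mike".toList, "{user_name}".toList), ("Oracle Health".toList, "{company_1}".toList), ("Alex Recruiting".toList, "{company_2}".toList)] t)
      = pvScan [("Mike".toList, "{user_name}".toList), ("Oracle Health".toList, "{company_1}".toList), ("Alex Recruiting".toList, "{company_2}".toList), ("Startup Intelligence OS".toList, "{company_3}".toList)] t := by
    intro t
    simpa using pvStep "Startup Intelligence OS".toList "{company_3}".toList
      [("Mike".toList, "{user_name}".toList), ("Oracle Health".toList, "{company_1}".toList), ("Alex Recruiting".toList, "{company_2}".toList)]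
      (by decide) (by decide) (by decide) (by decide) (by decide) t
  have e5 : ∀ t, pvReplRec "Jacob".toList "{family_member}".toList
      (pvScan [("Mike".toList, "{user_name}".toList), ("Oracle Health".toList, "{company_1}".toList), ("Alex Recruiting".toList, "{company_2}".toList), ("Startup Intelligence OS".toList, "{company_3}".toList)] t)
      = pvScan [("Mike".toList, "{user_name}".toList), ("Oracle Health".toList, "{company_1}".toList), ("Alex Recruiting".toList, "{company_2}".toList), ("Startup Intelligence OS".toList, "{company_3}".toList), ("Jacob".toList, "{family_member}".toList)] t := by
    intro t
    simpa using pvStep "Jacob".toList "{family_member}".toList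
      [("Mike".toList, "{user_name}".toList), ("Oracle Health".toList, "{company_1}".toList), ("Alex Recruiting".toList, "{company_2}".toList), ("Startup Intelligence OS".toList, "{company_3}".toList)]
      (by decide) (by decide) (by decide) (by decide) (by decide) t
  have e6 : ∀ t, pvReplRec "James".toList "{family_member}".toList
      (pvScan [("Mike".toList, "{user_name}".toList), ("Oracle Health".toList, "{company_1}".toList), ("Alex Recruiting".toList, "{company_2}".toList), ("Startup Intelligence OS".toList, "{company_3}".toList), ("Jacob".toList, "{family_member}".toList)] t)
      = pvScan [("Mike".toList, "{user_name}".toList), ("Oracle Health".toList, "{company_1}".toList), ("Alex Recruiting".toList, "{company_2}".toList), ("Startup Intelligence OS".toList, "{company_3}".toList), ("Jacob".toList, "{family_member}".toList), ("James".toList, "{family_member}".toList)] t := by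
    intro t
    simpa using pvStep "James".toList "{family_member}".toList
      [("Mike".toList, "{user_name}".toList), ("Oracle Health".toList, "{company_1}".toList), ("Alex Recruiting".toList, "{company_2}".toList), ("Startup Intelligence OS".toList, "{company_3}".toList), ("Jacob".toList, "{family_member}".toList)]
      (by decide) (by decide) (by decide) (by decide) (by decide) t
  have e7 : ∀ t, pvReplRec "Matt Cohlmia".toList "{vip_contact}".toList
      (pvScan [("Mike".toList, "{user_name}".toList), ("Oracle Health".toList, "{company_1}".toList), ("Alex Recruiting".toList, "{company_2}".toList), ("Startup Intelligence OS".toList, "{company_3}".toList), ("Jacob".toList, "{family_member}".toList), ("James".toList, "{family_member}".toList)] t)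
      = pvScan [("Mike".toList, "{user_name}".toList), ("Oracle Health".toList, "{company_1}".toList), ("Alex Recruiting".toList, "{company_2}".toList), ("Startup Intelligence OS".toList, "{company_3}".toList), ("Jacob".toList, "{family_member}".toList), ("James".toList, "{family_member}".toList), ("Matt Cohlmia".toList, "{vip_contact}".toList)] t := by
    intro t
    simpa using pvStep "Matt Cohlmia".toList "{vip_contact}".toList
      [("Mike".toList, "{user_name}".toList), ("Oracle Health".toList, "{company_1}".toList), ("Alex Recruiting".toList, "{company_2}".toList), ("Startup Intelligence OS".toList, "{company_3}".toList), ("Jacob".toList, "{family_member}".toList), ("James".toList, "{family_member}".toList)]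
      (by decide) (by decide) (by decide) (by decide) (by decide) t
  rw [e1, e2, e3, e4, e5, e6, e7]
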